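-- pv_equiv track=rewrite | github.com/federicober/advent | 2023/10/second.py | drop_boundary_zones
-- ===== SOURCE A (Python) =====
-- def drop_boundary_zones(
--     zones: list[set[tuple[int, int]]], puzzle: list[str]
-- ) -> list[set[tuple[int, int]]]:
--     idx_to_delete: set[int] = set()
--     nbr_rows = len(puzzle)
--     nbr_cols = len(puzzle[0])
--     frontier = set(
--         [(idx, 0) for idx in range(nbr_rows)]
--         + [(idx, nbr_cols - 1) for idx in range(nbr_rows)]
--         + [(0, idx) for idx in range(nbr_cols)]
--         + [(nbr_rows - 1, idx) for idx in range(nbr_cols)]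
--     )
--     for coord in frontier:
--         for zone_num, zone in enumerate(zones):
--             if coord in zone:
--                 idx_to_delete.add(zone_num)
--
--     return [zones for idx, zones in enumerate(zones) if idx not in idx_to_delete]
-- ===== SOURCE B (Python) =====
-- def drop_boundary_zones(zones, puzzle):
--     r_max = len(puzzle) - 1
--     c_max = len(puzzle[0]) - 1
--
--     def touches(cell):
--         r, c = cell
--         return ((c == 0 or c == c_max) and 0 <= r <= r_max) or (
--             (r == 0 or r == r_max) and 0 <= c <= c_max
--         )
--
--     return [zone for zone in zones if not any(touches(cell) for cell in zone)]
-- ===== Notes on version B (the rewrite author's own statement) =====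
-- stated objective: faster
-- what changed: Instead of materialising the frontier coordinate set and scanning every zone for every frontier cell, B tests each zone's own cells once against a closed-form boundary predicate.
-- outside the precondition, e.g. on drop_boundary_zones([], []): A raises IndexError, B raises IndexError
import Mathlib
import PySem

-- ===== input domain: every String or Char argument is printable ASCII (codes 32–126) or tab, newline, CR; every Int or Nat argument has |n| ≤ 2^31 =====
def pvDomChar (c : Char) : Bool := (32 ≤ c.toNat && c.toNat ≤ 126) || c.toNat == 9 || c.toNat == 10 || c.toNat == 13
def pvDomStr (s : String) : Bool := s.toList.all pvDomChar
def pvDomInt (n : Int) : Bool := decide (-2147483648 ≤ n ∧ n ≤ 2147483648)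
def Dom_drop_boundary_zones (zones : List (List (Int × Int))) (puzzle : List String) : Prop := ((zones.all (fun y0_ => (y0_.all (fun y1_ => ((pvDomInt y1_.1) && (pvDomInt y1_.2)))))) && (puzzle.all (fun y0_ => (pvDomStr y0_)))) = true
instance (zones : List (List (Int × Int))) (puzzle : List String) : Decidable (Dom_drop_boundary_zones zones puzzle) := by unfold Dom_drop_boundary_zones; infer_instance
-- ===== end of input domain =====

-- B replaces A's frontier-set × zones double scan by a single per-cell boundary test over each zone.


-- ===== PORT A =====
def drop_boundary_zones (zones : List (List (Int × Int))) (puzzle : List String) : List (List (Int × Int)) :=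
  match PySem.List.pyGet? puzzle 0 with
  | none => []  -- puzzle[0] raises IndexError; excluded by Pre_
  | some row0 =>
    let nbr_rows : Int := puzzle.length
    let nbr_cols : Int := PySem.Str.len row0
    let frontier : PySem.Set (Int × Int) := PySem.Set.ofList
      (((PySem.List.pyRange 0 nbr_rows 1).map (fun idx => (idx, (0 : Int)))) ++
       ((PySem.List.pyRange 0 nbr_rows 1).map (fun idx => (idx, nbr_cols - 1))) ++
       ((PySem.List.pyRange 0 nbr_cols 1).map (fun idx => ((0 : Int), idx))) ++
       ((PySem.List.pyRange 0 nbr_cols 1).map (fun idx => (nbr_rows - 1, idx))))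
    let idx_to_delete : PySem.Set Int :=
      frontier.foldl (fun acc coord =>
        (PySem.List.enumerate zones 0).foldl (fun acc2 p =>
          if p.2.contains coord then PySem.Set.add acc2 p.1 else acc2) acc)
        PySem.Set.empty
    ((PySem.List.enumerate zones 0).filter
        (fun p => !(PySem.Set.contains idx_to_delete p.1))).map (fun p => p.2)

-- ===== PORT B =====
def pvTouches (rmax cmax : Int) (cell : Int × Int) : Bool :=
  ((cell.2 == 0 || cell.2 == cmax) && decide (0 ≤ cell.1 ∧ cell.1 ≤ rmax)) ||
  ((cell.1 == 0 || cell.1 == rmax) && decide (0 ≤ cell.2 ∧ cell.2 ≤ cmax))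

def drop_boundary_zones_alt (zones : List (List (Int × Int))) (puzzle : List String) : List (List (Int × Int)) :=
  match PySem.List.pyGet? puzzle 0 with
  | none => []  -- len(puzzle[0]) raises IndexError; excluded by Pre_
  | some row0 =>
    let rmax : Int := (puzzle.length : Int) - 1
    let cmax : Int := PySem.Str.len row0 - 1
    zones.filter (fun z => !(z.any (pvTouches rmax cmax)))

-- ===== PRECONDITION & SPEC =====
-- Pre_ excludes exactly the inputs where A raises IndexError (puzzle[0] on an empty puzzle).
def Pre_drop_boundary_zones (zones : List (List (Int × Int))) (puzzle : List String) : Prop := puzzle ≠ []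
instance (zones : List (List (Int × Int))) (puzzle : List String) : Decidable (Pre_drop_boundary_zones zones puzzle) := by unfold Pre_drop_boundary_zones; infer_instance
def pvWitness_drop_boundary_zones : (List (List (Int × Int))) × List String := ([[(0,0)],[(1,1)]], ["...", "..."])

def Spec_drop_boundary_zones (zones : List (List (Int × Int))) (puzzle : List String) (out : List (List (Int × Int))) : Prop := out = drop_boundary_zones_alt zones puzzle
instance (zones : List (List (Int × Int))) (puzzle : List String) (out : List (List (Int × Int))) : Decidable (Spec_drop_boundary_zones zones puzzle out) := by unfold Spec_drop_boundary_zones; infer_instance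

-- ===== CLAIM (what is proved, stated in full; the proofs are below) =====
def Claim_equal_drop_boundary_zones : Prop := ∀ (zones : List (List (Int × Int))) (puzzle : List String), Dom_drop_boundary_zones zones puzzle → Pre_drop_boundary_zones zones puzzle → Spec_drop_boundary_zones zones puzzle (drop_boundary_zones zones puzzle)

-- ===== LEMMAS AND PROOFS =====

-- membership in the inner fold: j was already deleted, or some enumerated zone contains coord
theorem pv_inner_mem (E : List (Int × List (Int × Int))) (coord : Int × Int)
    (acc : PySem.Set Int) (j : Int) :
    j ∈ E.foldl (fun acc2 p => if p.2.contains coord then PySem.Set.add acc2 p.1 else acc2) acc ↔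
      j ∈ acc ∨ ∃ p ∈ E, p.1 = j ∧ coord ∈ p.2 := by
  induction E generalizing acc with
  | nil => simp
  | cons q E ih =>
    simp only [List.foldl_cons, ih, List.mem_cons]
    split_ifs with h
    · simp only [PySem.Set.mem_add]
      constructor
      · rintro (((hj | hj) | ⟨p, hp, hj, hc⟩))
        · exact Or.inl hj
        · exact Or.inr ⟨q, Or.inl rfl, hj.symm, by simpa using h⟩
        · exact Or.inr ⟨p, Or.inr hp, hj, hc⟩
      · rintro (hj | ⟨p, (rfl | hp), hj, hc⟩)
        · exact Or.inl (Or.inl hj)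
        · exact Or.inl (Or.inr hj.symm)
        · exact Or.inr ⟨p, hp, hj, hc⟩
    · constructor
      · rintro (hj | ⟨p, hp, hj, hc⟩)
        · exact Or.inl hj
        · exact Or.inr ⟨p, Or.inr hp, hj, hc⟩
      · rintro (hj | ⟨p, (rfl | hp), hj, hc⟩)
        · exact Or.inl hj
        · exact absurd (by simpa using hc) (by simpa using h)
        · exact Or.inr ⟨p, hp, hj, hc⟩

-- membership in the full double fold
theorem pv_outer_mem (F : List (Int × Int)) (E : List (Int × List (Int × Int)))
    (acc : PySem.Set Int) (j : Int) :
    j ∈ F.foldl (fun acc coord =>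
        E.foldl (fun acc2 p => if p.2.contains coord then PySem.Set.add acc2 p.1 else acc2) acc) acc ↔
      j ∈ acc ∨ ∃ c ∈ F, ∃ p ∈ E, p.1 = j ∧ c ∈ p.2 := by
  induction F generalizing acc with
  | nil => simp
  | cons c F ih =>
    simp only [List.foldl_cons, ih, pv_inner_mem, List.mem_cons]
    constructor
    · rintro ((hj | ⟨p, hp, hj, hc⟩) | ⟨c', hc', hrest⟩)
      · exact Or.inl hj
      · exact Or.inr ⟨c, Or.inl rfl, p, hp, hj, hc⟩
      · exact Or.inr ⟨c', Or.inr hc', hrest⟩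
    · rintro (hj | ⟨c', (rfl | hc'), hrest⟩)
      · exact Or.inl (Or.inl hj)
      · exact Or.inl (Or.inr hrest)
      · exact Or.inr ⟨c', hc', hrest⟩

-- the frontier list holds exactly the cells pvTouches accepts
theorem pv_frontier_mem (rows cols : Int) (c : Int × Int) :
    (c ∈ ((PySem.List.pyRange 0 rows 1).map (fun idx => (idx, (0 : Int)))) ++
         ((PySem.List.pyRange 0 rows 1).map (fun idx => (idx, cols - 1))) ++
         ((PySem.List.pyRange 0 cols 1).map (fun idx => ((0 : Int), idx))) ++
         ((PySem.List.pyRange 0 cols 1).map (fun idx => (rows - 1, idx)))) ↔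
      pvTouches (rows - 1) (cols - 1) c = true := by
  obtain ⟨r, cc⟩ := c
  simp only [List.mem_append, List.mem_map, PySem.List.mem_pyRange_one, Prod.mk.injEq,
    pvTouches, Bool.or_eq_true, Bool.and_eq_true, beq_iff_eq, decide_eq_true_eq]
  constructor
  · rintro (((⟨i, hi, rfl, rfl⟩ | ⟨i, hi, rfl, rfl⟩) | ⟨i, hi, rfl, rfl⟩) | ⟨i, hi, rfl, rfl⟩) <;>
      first
      | exact Or.inl ⟨by omega, by omega⟩
      | exact Or.inr ⟨by omega, by omega⟩
  · rintro (⟨h1, h2⟩ | ⟨h1, h2⟩)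
    · rcases h1 with rfl | rfl
      · exact Or.inl (Or.inl (Or.inl ⟨r, by omega, rfl, rfl⟩))
      · exact Or.inl (Or.inl (Or.inr ⟨r, by omega, rfl, rfl⟩))
    · rcases h1 with rfl | rfl
      · exact Or.inl (Or.inr ⟨cc, by omega, rfl, rfl⟩)
      · exact Or.inr ⟨cc, by omega, rfl, rfl⟩

-- enumerate is injective on first components (among its members)
theorem pv_enumerate_fst_inj (zones : List (List (Int × Int)))
    (p q : Int × List (Int × Int)) (hp : p ∈ PySem.List.enumerate zones 0)
    (hq : q ∈ PySem.List.enumerate zones 0) (h : p.1 = q.1) : p = q := by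
  rw [PySem.List.mem_enumerate_iff] at hp hq
  obtain ⟨k, hk, rfl⟩ := hp
  obtain ⟨k', hk', rfl⟩ := hq
  simp only [zero_add] at h ⊢
  have : k = k' := by exact_mod_cast h
  subst this; rfl

theorem drop_boundary_zones_eq (zones : List (List (Int × Int))) (puzzle : List String)
    (hpre : puzzle ≠ []) :
    drop_boundary_zones zones puzzle = drop_boundary_zones_alt zones puzzle := by
  obtain ⟨row0, rest, rfl⟩ : ∃ r t, puzzle = r :: t := by
    cases puzzle with
    | nil => exact absurd rfl hpre
    | cons r t => exact ⟨r, t, rfl⟩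
  unfold drop_boundary_zones drop_boundary_zones_alt
  have h0 : PySem.List.pyGet? (row0 :: rest) (0 : Int) = some row0 := by simp [PySem.List.pyGet?, PySem.List.pyIdx?]
  rw [h0]
  dsimp only
  set rows : Int := (((row0 :: rest).length : Nat) : Int) with hrows
  set cols : Int := PySem.Str.len row0 with hcols
  set F : List (Int × Int) :=
      (((PySem.List.pyRange 0 rows 1).map (fun idx => (idx, (0 : Int)))) ++
       ((PySem.List.pyRange 0 rows 1).map (fun idx => (idx, cols - 1))) ++
       ((PySem.List.pyRange 0 cols 1).map (fun idx => ((0 : Int), idx))) ++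
       ((PySem.List.pyRange 0 cols 1).map (fun idx => (rows - 1, idx)))) with hF
  set E := PySem.List.enumerate zones 0 with hE
  set del : PySem.Set Int :=
      (PySem.Set.ofList F).foldl (fun acc coord =>
        E.foldl (fun acc2 q => if q.2.contains coord then PySem.Set.add acc2 q.1 else acc2) acc)
        PySem.Set.empty with hdel
  -- rewrite B's filter over zones as a filter over the enumeration
  have hsnd : E.map (fun p => p.2) = zones := PySem.List.map_snd_enumerate zones 0
  rw [← hsnd, List.filter_map]
  congr 1
  apply List.filter_congr
  intro p hp
  -- both predicates decide "zone p.2 meets the boundary"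
  have key : PySem.Set.contains del p.1 = p.2.any (pvTouches (rows - 1) (cols - 1)) := by
    rw [Bool.eq_iff_iff]
    rw [show (PySem.Set.contains del p.1 = true) ↔ p.1 ∈ del from by simp [PySem.Set.contains]]
    rw [hdel, pv_outer_mem]
    simp only [PySem.Set.empty, List.not_mem_nil, false_or, List.any_eq_true]
    constructor
    · rintro ⟨c, hcF, q, hq, hq1, hcq⟩
      have : q = p := pv_enumerate_fst_inj zones q p hq hp hq1
      subst this
      exact ⟨c, hcq, (pv_frontier_mem rows cols c).mp ((PySem.Set.mem_ofList F c).mp hcF)⟩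
    · rintro ⟨c, hcp, hct⟩
      exact ⟨c, (PySem.Set.mem_ofList F c).mpr ((pv_frontier_mem rows cols c).mpr hct), p, hp, rfl, hcp⟩
  have key' : decide (p.1 ∈ del) = p.2.any (pvTouches (rows - 1) (cols - 1)) := by
    rw [← key]; simp [PySem.Set.contains]
  simp [Function.comp, key']

-- ===== VERDICT (by name: the statement is the Claim_ definition above) =====
theorem drop_boundary_zones_spec : Claim_equal_drop_boundary_zones := by
  intro zones puzzle _ hpre
  exact drop_boundary_zones_eq zones puzzle hpre
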